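-- pv_equiv track=rewrite | github.com/pypi-data/pypi-mirror-351 | packages/arc-eval/arc_eval-0.2.7-py3-none-any.whl/agent_eval/analysis/self_improvement.py | _generate_retraining_recommendations
-- ===== SOURCE A (Python) =====
-- from typing import Dict, List, Any, Optional, Tuple
--
-- def _generate_retraining_recommendations(declining_areas: List[Dict]) -> List[str]:
--     """Generate specific retraining recommendations."""
--     recommendations = []
--
--     for area in declining_areas:
--         area_name = area['area']
--         if 'compliance' in area_name.lower():
--             recommendations.append(f"Focus on regulatory framework training for {area_name}")
--         elif 'bias' in area_name.lower():
--             recommendations.append(f"Implement bias detection and mitigation training")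
--         elif 'security' in area_name.lower():
--             recommendations.append(f"Enhance threat detection and security protocol training")
--         else:
--             recommendations.append(f"Targeted training for {area_name} improvement")
--
--     return recommendations
-- ===== SOURCE B (Python) =====
-- def _generate_retraining_recommendations(declining_areas):
--     """Keyword-major: start from the default recommendation for every area, then
--     one overwrite pass per keyword in reverse priority order (compliance last,
--     so it wins, reproducing the elif priority)."""
--     names = [area["area"] for area in declining_areas]
--     recs = [f"Targeted training for {n} improvement" for n in names]
--     for keyword, template in [
--         ("security", "Enhance threat detection and security protocol training"),
--         ("bias", "Implement bias detection and mitigation training"),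
--         ("compliance", "Focus on regulatory framework training for {}"),
--     ]:
--         for i, n in enumerate(names):
--             if keyword in n.lower():
--                 recs[i] = template.format(n)
--     return recs
-- ===== Notes on version B (the rewrite author's own statement) =====
-- stated objective: alternative
-- what changed: Replaces A's area-major loop with a per-area if/elif first-match chain by a keyword-major algorithm: one default pass builds a recommendation per area, then three whole-list overwrite passes (security, bias, compliance, reverse priority so compliance's overwrite wins last).
import Mathlib
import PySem

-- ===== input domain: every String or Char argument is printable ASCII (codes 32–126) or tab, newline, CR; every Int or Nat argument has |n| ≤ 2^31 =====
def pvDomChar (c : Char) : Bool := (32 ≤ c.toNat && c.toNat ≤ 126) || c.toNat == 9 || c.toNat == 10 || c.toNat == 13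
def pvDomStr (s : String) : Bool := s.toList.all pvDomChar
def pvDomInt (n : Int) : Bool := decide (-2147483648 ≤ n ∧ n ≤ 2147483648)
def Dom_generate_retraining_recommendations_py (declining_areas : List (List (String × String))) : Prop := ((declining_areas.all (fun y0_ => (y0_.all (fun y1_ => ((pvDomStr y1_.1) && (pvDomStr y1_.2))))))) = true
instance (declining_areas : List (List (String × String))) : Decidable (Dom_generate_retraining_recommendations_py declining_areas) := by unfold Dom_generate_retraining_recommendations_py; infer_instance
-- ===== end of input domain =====

-- B is a keyword-major re-implementation: defaults first, then three whole-list
-- overwrite passes in reverse priority order; same O(n) cost, different traversal.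

-- ===== PORT A =====
-- area['area'] on the association list: first match (KeyError = no match, excluded by Pre_)
def pvLookupArea (area : List (String × String)) : Option String :=
  (area.find? (fun kv => kv.1 == "area")).map Prod.snd

def generate_retraining_recommendations_py (declining_areas : List (List (String × String))) : List String :=
  declining_areas.foldl (fun recommendations area =>
    let area_name := (pvLookupArea area).getD ""   -- Pre_ guarantees the key is present
    if PySem.Str.isIn "compliance" (PySem.Str.lower area_name) then
      recommendations ++ ["Focus on regulatory framework training for " ++ area_name]
    else if PySem.Str.isIn "bias" (PySem.Str.lower area_name) then
      recommendations ++ ["Implement bias detection and mitigation training"]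
    else if PySem.Str.isIn "security" (PySem.Str.lower area_name) then
      recommendations ++ ["Enhance threat detection and security protocol training"]
    else
      recommendations ++ ["Targeted training for " ++ area_name ++ " improvement"]) []

-- ===== PORT B =====
-- one overwrite pass: for i, n in enumerate(names): if keyword in n.lower(): recs[i] = tmpl(n)
def pvPass (kw : String) (tmpl : String → String) (names recs : List String) : List String :=
  List.zipWith (fun n r => if PySem.Str.isIn kw (PySem.Str.lower n) then tmpl n else r) names recs

def generate_retraining_recommendations_py_alt (declining_areas : List (List (String × String))) : List String :=
  let names := declining_areas.map (fun area => (pvLookupArea area).getD "")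
  let recs0 := names.map (fun n => "Targeted training for " ++ n ++ " improvement")
  let recs1 := pvPass "security" (fun _ => "Enhance threat detection and security protocol training") names recs0
  let recs2 := pvPass "bias" (fun _ => "Implement bias detection and mitigation training") names recs1
  pvPass "compliance" (fun n => "Focus on regulatory framework training for " ++ n) names recs2

-- ===== PRECONDITION & SPEC =====
-- Pre_ excludes exactly the inputs where some dict lacks the key 'area': A raises KeyError there.
def Pre_generate_retraining_recommendations_py (declining_areas : List (List (String × String))) : Prop :=
  (declining_areas.all (fun area => area.any (fun kv => kv.1 == "area"))) = true
instance (declining_areas : List (List (String × String))) : Decidable (Pre_generate_retraining_recommendations_py declining_areas) := by unfold Pre_generate_retraining_recommendations_py; infer_instance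

def pvWitness_generate_retraining_recommendations_py : (List (List (String × String))) :=
  [[("area", "Bias Audit")], [("area", "latency")]]

def Spec_generate_retraining_recommendations_py (declining_areas : List (List (String × String))) (out : List String) : Prop := out = generate_retraining_recommendations_py_alt declining_areas
instance (declining_areas : List (List (String × String))) (out : List String) : Decidable (Spec_generate_retraining_recommendations_py declining_areas out) := by unfold Spec_generate_retraining_recommendations_py; infer_instance

-- ===== CLAIM (what is proved, stated in full; the proofs are below) =====
def Claim_equal_generate_retraining_recommendations_py : Prop := ∀ (declining_areas : List (List (String × String))), Dom_generate_retraining_recommendations_py declining_areas → Pre_generate_retraining_recommendations_py declining_areas → Spec_generate_retraining_recommendations_py declining_areas (generate_retraining_recommendations_py declining_areas)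

-- ===== LEMMAS AND PROOFS =====

-- a pass applied to a mapped list is the pointwise combination
lemma pvPass_map (kw : String) (tmpl : String → String) (f : String → String)
    (names : List String) :
    pvPass kw tmpl names (names.map f)
      = names.map (fun n => if PySem.Str.isIn kw (PySem.Str.lower n) then tmpl n else f n) := by
  induction names with
  | nil => rfl
  | cons a t ih => simp [pvPass] at ih ⊢; exact ih

-- B collapses to a single map of the stacked conditionals
lemma alt_eq_map (das : List (List (String × String))) :
    generate_retraining_recommendations_py_alt das
      = das.map (fun area =>
          let n := (pvLookupArea area).getD ""
          if PySem.Str.isIn "compliance" (PySem.Str.lower n) then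
            "Focus on regulatory framework training for " ++ n
          else if PySem.Str.isIn "bias" (PySem.Str.lower n) then
            "Implement bias detection and mitigation training"
          else if PySem.Str.isIn "security" (PySem.Str.lower n) then
            "Enhance threat detection and security protocol training"
          else
            "Targeted training for " ++ n ++ " improvement") := by
  unfold generate_retraining_recommendations_py_alt
  simp only []
  rw [pvPass_map, pvPass_map, pvPass_map, List.map_map]
  rfl

-- A's append loop, generalized over the accumulator, is the same map
lemma foldl_branch_eq_map (l : List (List (String × String))) (acc : List String) :
    l.foldl (fun recommendations area =>
      let area_name := (pvLookupArea area).getD ""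
      if PySem.Str.isIn "compliance" (PySem.Str.lower area_name) then
        recommendations ++ ["Focus on regulatory framework training for " ++ area_name]
      else if PySem.Str.isIn "bias" (PySem.Str.lower area_name) then
        recommendations ++ ["Implement bias detection and mitigation training"]
      else if PySem.Str.isIn "security" (PySem.Str.lower area_name) then
        recommendations ++ ["Enhance threat detection and security protocol training"]
      else
        recommendations ++ ["Targeted training for " ++ area_name ++ " improvement"]) acc
    = acc ++ l.map (fun area =>
        let n := (pvLookupArea area).getD ""
        if PySem.Str.isIn "compliance" (PySem.Str.lower n) then
          "Focus on regulatory framework training for " ++ n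
        else if PySem.Str.isIn "bias" (PySem.Str.lower n) then
          "Implement bias detection and mitigation training"
        else if PySem.Str.isIn "security" (PySem.Str.lower n) then
          "Enhance threat detection and security protocol training"
        else
          "Targeted training for " ++ n ++ " improvement") := by
  induction l generalizing acc with
  | nil => simp
  | cons a t ih =>
    simp only [List.foldl_cons, List.map_cons]
    rw [ih]
    split_ifs <;> simp_all

-- ===== VERDICT (by name: the statement is the Claim_ definition above) =====
theorem generate_retraining_recommendations_py_spec : Claim_equal_generate_retraining_recommendations_py := by
  intro das _ _
  unfold Spec_generate_retraining_recommendations_py generate_retraining_recommendations_py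
  rw [alt_eq_map]
  simpa using foldl_branch_eq_map das []
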